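-- pv_equiv track=rewrite | github.com/inyong37/Study | Algorithm/iii. Codility/A. Lessons/Lesson10_01_MinPerimeterRectangle.py | solution
-- ===== SOURCE A (Python) =====
-- def solution(N):
--     answer = 4 * N
--     for i in range(1, int(N / 2) + 1):
--         a, b = divmod(N, i)
--         if b == 0:
--             if 2 * (i + a) < answer:
--                 answer = 2 * (i + a)
--     return answer
-- ===== SOURCE B (Python) =====
-- def solution(N):
--     best = 4 * N
--     i = 1
--     while i * i <= N:
--         if N % i == 0:
--             p = 2 * (i + N // i)
--             if p < best:
--                 best = p
--         i += 1
--     return best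
-- ===== Notes on version B (the rewrite author's own statement) =====
-- stated objective: faster
-- what changed: B scans only candidate divisors i with i*i <= N (each small divisor stands for its cofactor pair), instead of A's scan of every i up to N/2.
import Mathlib
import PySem

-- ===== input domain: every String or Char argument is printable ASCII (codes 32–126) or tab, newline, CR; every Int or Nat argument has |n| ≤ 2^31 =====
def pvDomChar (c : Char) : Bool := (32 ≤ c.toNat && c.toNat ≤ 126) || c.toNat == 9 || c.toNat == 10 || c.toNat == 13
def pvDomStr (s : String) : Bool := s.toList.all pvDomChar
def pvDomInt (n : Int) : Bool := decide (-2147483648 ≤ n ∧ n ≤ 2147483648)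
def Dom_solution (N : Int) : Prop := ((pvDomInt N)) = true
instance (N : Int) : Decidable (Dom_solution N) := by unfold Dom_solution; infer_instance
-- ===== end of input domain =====

-- B replaces A's scan of every i up to N/2 by a scan of the candidate divisors i with i*i ≤ N
-- (each small divisor stands for its cofactor pair); same return value, asymptotically fewer iterations.

-- ===== PORT A =====
-- int(N / 2): on |N| ≤ 2^31 the float N/2 is exact, and int() truncates toward zero = Int.tdiv.
-- divmod(N, i) is ported componentwise as (floordiv, mod); i ≥ 1 inside the range, so divmod never raises.
def solution (N : Int) : Int :=
  (PySem.List.pyRange 1 (N.tdiv 2 + 1) 1).foldl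
    (fun answer i =>
      let a := PySem.Int.floordiv N i
      let b := PySem.Int.mod N i
      if b = 0 then
        (if 2 * (i + a) < answer then 2 * (i + a) else answer)
      else answer)
    (4 * N)

-- ===== PORT B =====
-- the while loop of Source B, with fuel N.toNat + 1 (the loop runs while i*i ≤ N starting at i = 1,
-- hence at most N iterations; the fuel is never exhausted before the condition fails)
def solAltLoop (N : Int) : Nat → Int → Int → Int
  | 0, _, best => best
  | fuel + 1, i, best =>
    if i * i ≤ N then
      solAltLoop N fuel (i + 1)
        (if PySem.Int.mod N i = 0 then
          (if 2 * (i + PySem.Int.floordiv N i) < best then 2 * (i + PySem.Int.floordiv N i) else best)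
         else best)
    else best

def solution_alt (N : Int) : Int := solAltLoop N (N.toNat + 1) 1 (4 * N)

-- ===== PRECONDITION & SPEC =====
def Spec_solution (N : Int) (out : Int) : Prop := out = solution_alt N
instance (N : Int) (out : Int) : Decidable (Spec_solution N out) := by unfold Spec_solution; infer_instance

-- ===== CLAIM (what is proved, stated in full; the proofs are below) =====
def Claim_equal_solution : Prop := ∀ (N : Int), Dom_solution N → Spec_solution N (solution N)

-- ===== LEMMAS AND PROOFS =====

-- the candidate perimeter for side i, and the common update step of both loops
def pvPer (N i : Int) : Int := 2 * (i + PySem.Int.floordiv N i)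
def pvStep (N a i : Int) : Int :=
  if PySem.Int.mod N i = 0 then (if pvPer N i < a then pvPer N i else a) else a

theorem pvStep_le (N a i : Int) : pvStep N a i ≤ a := by
  unfold pvStep; split_ifs <;> omega

theorem pvStep_le_per (N a i : Int) (h : PySem.Int.mod N i = 0) : pvStep N a i ≤ pvPer N i := by
  unfold pvStep; split_ifs <;> omega

theorem pvStep_cases (N a i : Int) :
    pvStep N a i = a ∨ (PySem.Int.mod N i = 0 ∧ pvStep N a i = pvPer N i) := by
  unfold pvStep; split_ifs <;> simp_all

-- A as a fold with pvStep
theorem solution_eq_fold (N : Int) :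
    solution N = (PySem.List.pyRange 1 (N.tdiv 2 + 1) 1).foldl (pvStep N) (4 * N) := by
  have h : (fun (answer i : Int) =>
      let a := PySem.Int.floordiv N i
      let b := PySem.Int.mod N i
      if b = 0 then (if 2 * (i + a) < answer then 2 * (i + a) else answer) else answer)
      = pvStep N := by
    funext a i
    simp only [pvStep, pvPer]
  rw [solution, h]

theorem foldA_le_init (N : Int) (L : List Int) (a : Int) : L.foldl (pvStep N) a ≤ a := by
  induction L generalizing a with
  | nil => simp
  | cons x L ih =>
    calc L.foldl (pvStep N) (pvStep N a x) ≤ pvStep N a x := ih _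
      _ ≤ a := pvStep_le N a x

theorem foldA_le_mem (N : Int) (L : List Int) :
    ∀ (a i : Int), i ∈ L → PySem.Int.mod N i = 0 → L.foldl (pvStep N) a ≤ pvPer N i := by
  induction L with
  | nil => intro a i hm _; simp at hm
  | cons x L ih =>
    intro a i hm hd
    rcases List.mem_cons.mp hm with h | h
    · subst h
      rw [List.foldl_cons]
      calc L.foldl (pvStep N) (pvStep N a i) ≤ pvStep N a i := foldA_le_init N L _
        _ ≤ pvPer N i := pvStep_le_per N a i hd
    · rw [List.foldl_cons]
      exact ih _ i h hd

theorem foldA_cases (N : Int) (L : List Int) (a : Int) :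
    L.foldl (pvStep N) a = a ∨
      ∃ i ∈ L, PySem.Int.mod N i = 0 ∧ L.foldl (pvStep N) a = pvPer N i := by
  induction L generalizing a with
  | nil => simp
  | cons x L ih =>
    rcases ih (pvStep N a x) with h | ⟨i, hi, hd, he⟩
    · rcases pvStep_cases N a x with h2 | ⟨hd, h2⟩
      · exact Or.inl (by rw [List.foldl_cons, h, h2])
      · exact Or.inr ⟨x, by simp, hd, by rw [List.foldl_cons, h, h2]⟩
    · exact Or.inr ⟨i, by simp [hi], hd, by rw [List.foldl_cons]; exact he⟩

-- B's loop step is pvStep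
theorem solAltLoop_succ (N : Int) (f : Nat) (i b : Int) :
    solAltLoop N (f + 1) i b =
      if i * i ≤ N then solAltLoop N f (i + 1) (pvStep N b i) else b := by
  simp [solAltLoop, pvStep, pvPer]

theorem loopB_le_init (N : Int) (f : Nat) (i b : Int) : solAltLoop N f i b ≤ b := by
  induction f generalizing i b with
  | zero => simp [solAltLoop]
  | succ f ih =>
    rw [solAltLoop_succ]
    split_ifs with h
    · calc solAltLoop N f (i + 1) (pvStep N b i) ≤ pvStep N b i := ih _ _
        _ ≤ b := pvStep_le N b i
    · exact le_refl b

theorem loopB_le_mem (N : Int) (j : Int) (hj : j * j ≤ N) (hd : PySem.Int.mod N j = 0) :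
    ∀ (f : Nat) (i b : Int), i ≤ j → 1 ≤ i → (j - i).toNat < f →
      solAltLoop N f i b ≤ pvPer N j := by
  intro f
  induction f with
  | zero => intro i b _ _ hf; omega
  | succ f ih =>
    intro i b hij hi hf
    rw [solAltLoop_succ]
    have hii : i * i ≤ N := by
      calc i * i ≤ j * j := by nlinarith
        _ ≤ N := hj
    rw [if_pos hii]
    rcases eq_or_lt_of_le hij with h | h
    · subst h
      calc solAltLoop N f (i + 1) (pvStep N b i) ≤ pvStep N b i := loopB_le_init N f _ _
        _ ≤ pvPer N i := pvStep_le_per N b i hd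
    · exact ih (i + 1) (pvStep N b i) (by omega) (by omega) (by omega)

theorem loopB_cases (N : Int) (f : Nat) (i b : Int) :
    solAltLoop N f i b = b ∨
      ∃ j : Int, i ≤ j ∧ j * j ≤ N ∧ PySem.Int.mod N j = 0 ∧ solAltLoop N f i b = pvPer N j := by
  induction f generalizing i b with
  | zero => simp [solAltLoop]
  | succ f ih =>
    rw [solAltLoop_succ]
    split_ifs with h
    · rcases ih (i + 1) (pvStep N b i) with h2 | ⟨j, hij, hj, hd, he⟩
      · rcases pvStep_cases N b i with h3 | ⟨hd, h3⟩
        · exact Or.inl (by rw [h2, h3])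
        · exact Or.inr ⟨i, le_refl i, h, hd, by rw [h2, h3]⟩
      · exact Or.inr ⟨j, by omega, hj, hd, he⟩
    · exact Or.inl rfl

-- arithmetic facts about divisors (N ≥ 2, positive divisor i)
theorem div_mod_zero (N i : Int) : PySem.Int.mod N i = 0 ↔ i ∣ N :=
  PySem.Int.mod_eq_zero_iff_dvd N i

theorem per_pair (N d : Int) (hd : 1 ≤ d) (hdvd : d ∣ N) (hN : 1 ≤ N) :
    pvPer N (N / d) = pvPer N d := by
  obtain ⟨c, hc⟩ := hdvd
  have hd0 : d ≠ 0 := by omega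
  have h1 : N / d = c := by rw [hc]; exact Int.mul_ediv_cancel_left c hd0
  have hc1 : 1 ≤ c := by
    by_cases h : c ≤ 0
    · have : d * c ≤ 0 := mul_nonpos_of_nonneg_of_nonpos (by omega) h
      omega
    · omega
  have hc0 : c ≠ 0 := by omega
  have h2 : N / c = d := by rw [hc, mul_comm]; exact Int.mul_ediv_cancel_left d hc0
  unfold pvPer
  have hcpos : (0:Int) < N / d := by omega
  rw [PySem.Int.floordiv_eq_ediv_of_pos (show (0:Int) < d by omega),
      PySem.Int.floordiv_eq_ediv_of_pos hcpos, h1, h2]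
  ring

-- main equality for N ≥ 2
theorem main_ge_two (N : Int) (hN : 2 ≤ N) : solution N = solution_alt N := by
  rw [solution_eq_fold]
  unfold solution_alt
  set L := PySem.List.pyRange 1 (N.tdiv 2 + 1) 1 with hL
  have htdiv : N.tdiv 2 = N / 2 := Int.tdiv_eq_ediv_of_nonneg (by omega)
  have hmemL : ∀ x : Int, x ∈ L ↔ 1 ≤ x ∧ x ≤ N / 2 := by
    intro x
    rw [hL, PySem.List.mem_pyRange_one]
    omega
  have hfuel : ∀ j : Int, 1 ≤ j → j * j ≤ N → (j - 1).toNat < N.toNat + 1 := by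
    intro j h1 h2
    have : j ≤ N := by nlinarith
    omega
  apply le_antisymm
  · -- A ≤ B : every value B can end with is matched by A
    rcases loopB_cases N (N.toNat + 1) 1 (4 * N) with h | ⟨j, h1j, hjj, hd, he⟩
    · rw [h]; exact foldA_le_init N L (4 * N)
    · rw [he]
      apply foldA_le_mem N L (4 * N) j _ hd
      rw [hmemL]
      refine ⟨h1j, ?_⟩
      -- a divisor j with j*j ≤ N and N ≥ 2 satisfies j ≤ N / 2
      have hdvd : j ∣ N := (div_mod_zero N j).mp hd
      obtain ⟨c, hc⟩ := hdvd
      rcases eq_or_lt_of_le h1j with h | h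
      · -- j = 1
        rw [← h]; omega
      · -- j ≥ 2 : then c ≥ j ≥ 2, so 2*j ≤ j*c = N
        have hc2 : j ≤ c := by nlinarith
        have h2j : 2 * j ≤ N := by nlinarith
        omega
  · -- B ≤ A : every value A can end with is matched by B (via the cofactor if needed)
    rcases foldA_cases N L (4 * N) with h | ⟨d, hdL, hd, he⟩
    · rw [h]; exact loopB_le_init N (N.toNat + 1) 1 (4 * N)
    · rw [he]
      obtain ⟨h1d, hdhalf⟩ := (hmemL d).mp hdL
      by_cases hsq : d * d ≤ N
      · exact loopB_le_mem N d hsq hd (N.toNat + 1) 1 (4 * N) h1d (le_refl 1)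
          (hfuel d h1d hsq)
      · -- use the cofactor c = N / d
        have hdvd : d ∣ N := (div_mod_zero N d).mp hd
        obtain ⟨c, hc⟩ := hdvd
        have hc1 : 1 ≤ c := by nlinarith
        have hcd : c < d := by nlinarith
        have hcc : c * c ≤ N := by nlinarith
        have hNc : N / d = c := by
          rw [hc]; exact Int.mul_ediv_cancel_left c (by omega)
        have hcd0 : PySem.Int.mod N c = 0 := by
          rw [div_mod_zero N c, hc]; exact Dvd.intro_left d rfl
        have hper : pvPer N c = pvPer N d := by
          have := per_pair N d h1d ⟨c, hc⟩ (by omega)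
          rwa [hNc] at this
        rw [← hper]
        exact loopB_le_mem N c hcc hcd0 (N.toNat + 1) 1 (4 * N) hc1 (le_refl 1)
          (hfuel c hc1 hcc)

-- small cases: N ≤ 0 (both loops are empty) and N = 1
theorem main_nonpos (N : Int) (hN : N ≤ 0) : solution N = solution_alt N := by
  have h1 : N.tdiv 2 ≤ 0 := by
    have h2 : (-N).tdiv 2 = (-N) / 2 := Int.tdiv_eq_ediv_of_nonneg (by omega)
    have h3 : (-N).tdiv 2 = -(N.tdiv 2) := Int.neg_tdiv N 2
    have h4 : 0 ≤ (-N) / 2 := Int.ediv_nonneg (by omega) (by norm_num)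
    omega
  have hr : PySem.List.pyRange 1 (N.tdiv 2 + 1) 1 = [] :=
    PySem.List.pyRange_one_eq_nil (by omega)
  have ht : N.toNat = 0 := by omega
  unfold solution solution_alt
  rw [hr, ht]
  simp only [List.foldl_nil, solAltLoop]
  omega

-- ===== VERDICT (by name: the statement is the Claim_ definition above) =====
theorem solution_spec : Claim_equal_solution := by
  intro N _
  unfold Spec_solution
  rcases lt_trichotomy N 1 with h | h | h
  · exact main_nonpos N (by omega)
  · subst h; decide
  · exact main_ge_two N (by omega)
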